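-- pv_equiv track=rewrite | github.com/benrose258/Python | Python 2.7 Files/Classwork/CS 110/Homework6.py | double_strand
-- ===== SOURCE A (Python) =====
-- def double_strand(string1,string2):
--     if len(string1) != len(string2):
--         return False
--     else:
--         reverse=""
--         for letter in string1:
--             if letter == "A":
--                 reverse = reverse + "T"
--             elif letter == "T":
--                 reverse = reverse + "A"
--             elif letter == "G":
--                 reverse = reverse + "C"
--             elif letter == "C":
--                 reverse = reverse + "G"
--     if reverse != string2:
--         return False
--     else:
--         return True
-- ===== SOURCE B (Python) =====
-- def double_strand(string1, string2):
--     if len(string1) != len(string2):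
--         return False
--     comp = {'A': 'T', 'T': 'A', 'G': 'C', 'C': 'G'}
--     return all(comp.get(a) == b for a, b in zip(string1, string2))
-- ===== Notes on version B (the rewrite author's own statement) =====
-- stated objective: faster
-- what changed: B replaces A's build-the-whole-complement-string-then-compare (quadratic repeated string concatenation) with a single short-circuiting zip/all pass comparing the dict-lookup complement of each char of string1 against string2; non-ATGC chars fail immediately (comp.get gives None) instead of being silently dropped and caught by the final comparison.
import Mathlib
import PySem

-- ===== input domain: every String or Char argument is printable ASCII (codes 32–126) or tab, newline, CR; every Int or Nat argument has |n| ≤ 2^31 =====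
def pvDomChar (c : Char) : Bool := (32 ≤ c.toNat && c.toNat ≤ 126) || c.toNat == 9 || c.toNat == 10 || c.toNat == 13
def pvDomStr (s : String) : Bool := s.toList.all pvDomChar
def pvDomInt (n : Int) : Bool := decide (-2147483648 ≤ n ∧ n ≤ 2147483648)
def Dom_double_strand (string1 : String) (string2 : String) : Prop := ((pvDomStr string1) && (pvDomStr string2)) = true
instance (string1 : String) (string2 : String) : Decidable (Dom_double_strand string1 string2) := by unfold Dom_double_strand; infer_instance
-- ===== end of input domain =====

-- B checks complementarity in one short-circuiting zip/all pass with a dict lookup instead of building the full complement string by repeated concatenation and comparing at the end (measured faster).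

-- ===== PORT A =====
def double_strand (string1 : String) (string2 : String) : Bool :=
  if PySem.Str.len string1 ≠ PySem.Str.len string2 then false
  else
    let reverse := string1.toList.foldl (fun reverse letter =>
      if letter = 'A' then reverse ++ ['T']
      else if letter = 'T' then reverse ++ ['A']
      else if letter = 'G' then reverse ++ ['C']
      else if letter = 'C' then reverse ++ ['G']
      else reverse) []
    if reverse ≠ string2.toList then false else true

-- ===== PORT B =====
def dsComp : PySem.Dict Char Char :=
  PySem.Dict.ofList [('A', 'T'), ('T', 'A'), ('G', 'C'), ('C', 'G')]

def double_strand_alt (string1 : String) (string2 : String) : Bool :=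
  if PySem.Str.len string1 ≠ PySem.Str.len string2 then false
  else (string1.toList.zip string2.toList).all (fun p => PySem.Dict.get? dsComp p.1 == some p.2)

-- ===== PRECONDITION & SPEC =====
def Spec_double_strand (string1 : String) (string2 : String) (out : Bool) : Prop := out = double_strand_alt string1 string2
instance (string1 : String) (string2 : String) (out : Bool) : Decidable (Spec_double_strand string1 string2 out) := by unfold Spec_double_strand; infer_instance

-- ===== CLAIM (what is proved, stated in full; the proofs are below) =====
def Claim_equal_double_strand : Prop := ∀ (string1 : String) (string2 : String), Dom_double_strand string1 string2 → Spec_double_strand string1 string2 (double_strand string1 string2)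

-- ===== LEMMAS AND PROOFS =====

-- the dict lookup, pointwise (same first-match order as the literal)
def dsCg (c : Char) : Option Char :=
  if 'A' = c then some 'T'
  else if 'T' = c then some 'A'
  else if 'G' = c then some 'C'
  else if 'C' = c then some 'G'
  else none

theorem dsComp_get (c : Char) : PySem.Dict.get? dsComp c = dsCg c := by
  have hmk : dsComp = PySem.Dict.mk [('A', 'T'), ('T', 'A'), ('G', 'C'), ('C', 'G')] := by decide
  rw [hmk]
  simp only [PySem.Dict.get?_mk_cons, dsCg]
  have hnil : (PySem.Dict.mk ([] : List (Char × Char))).get? c = none := by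
    simp [PySem.Dict.get?]
  rw [hnil]
  simp [beq_iff_eq]

-- one step of A's loop appends the complement of the letter (or nothing)
theorem dsStep (acc : List Char) (c : Char) :
    (if c = 'A' then acc ++ ['T']
     else if c = 'T' then acc ++ ['A']
     else if c = 'G' then acc ++ ['C']
     else if c = 'C' then acc ++ ['G']
     else acc) = acc ++ (dsCg c).toList := by
  simp only [dsCg]; split_ifs <;> subst_vars <;> simp_all

-- A's accumulating loop builds acc ++ filterMap dsCg
theorem dsFoldA (l : List Char) (acc : List Char) :
    l.foldl (fun reverse letter =>
      if letter = 'A' then reverse ++ ['T']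
      else if letter = 'T' then reverse ++ ['A']
      else if letter = 'G' then reverse ++ ['C']
      else if letter = 'C' then reverse ++ ['G']
      else reverse) acc = acc ++ l.filterMap dsCg := by
  induction l generalizing acc with
  | nil => simp
  | cons c t ih =>
      rw [List.foldl_cons, dsStep, ih]
      cases hcg : dsCg c <;> simp [hcg]

-- the core: under equal lengths, complement-string equality = pointwise zip check
theorem ds_core (l1 l2 : List Char) (h : l1.length = l2.length) :
    (decide (l1.filterMap dsCg = l2)) =
      (l1.zip l2).all (fun p => dsCg p.1 == some p.2) := by
  induction l1 generalizing l2 with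
  | nil => cases l2 <;> simp_all
  | cons a t ih =>
      cases l2 with
      | nil => simp at h
      | cons b t2 =>
        simp only [List.length_cons, Nat.add_right_cancel_iff] at h
        simp only [List.zip_cons_cons, List.all_cons]
        rw [List.filterMap_cons]
        cases hcg : dsCg a with
        | none =>
            have hlt : (t.filterMap dsCg).length < (b :: t2).length := by
              have := List.length_filterMap_le dsCg t
              simp only [List.length_cons]; omega
            have hne : t.filterMap dsCg ≠ b :: t2 := by
              intro he; rw [he] at hlt; omega
            simp [hne]
        | some x =>
            by_cases hxb : x = b <;> simp [hxb, ih t2 h]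

theorem double_strand_spec : Claim_equal_double_strand := by
  intro s1 s2 _
  unfold Spec_double_strand double_strand double_strand_alt
  by_cases hlen : PySem.Str.len s1 ≠ PySem.Str.len s2
  · rw [if_pos hlen, if_pos hlen]
  · rw [if_neg hlen, if_neg hlen]
    have hl : s1.toList.length = s2.toList.length := by
      rw [Decidable.not_not] at hlen
      rw [PySem.Str.len_eq_length, PySem.Str.len_eq_length,
        ← String.length_toList, ← String.length_toList] at hlen
      exact_mod_cast hlen
    rw [dsFoldA, List.nil_append]
    simp only [dsComp_get]
    rw [← ds_core s1.toList s2.toList hl]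
    by_cases he : s1.toList.filterMap dsCg = s2.toList <;> simp [he]
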